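-- pv_equiv track=rewrite | github.com/light1726/SpeechTripleNet | models/models.py | find_non_zero_segments
-- ===== SOURCE A (Python) =====
-- def find_non_zero_segments(array):
--     start = -1
--     end = -1
--     result = []
--     for i in range(len(array)):
--         if array[i] != 0:
--             if start == -1:
--                 start = i
--             else:
--                 end = i
--         elif start >= 0:
--             result.append((start, end))
--             start = -1
--             end = -1
--     if start >= 0:
--         result.append((start, end))
--     return result
-- ===== SOURCE B (Python) =====
-- def find_non_zero_segments(array):
--     # Run-based scan: locate each maximal non-zero run and report its
--     # (first index, last index), jumping past the run in one step.
--     result = []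
--     n = len(array)
--     i = 0
--     while i < n:
--         if array[i] != 0:
--             j = i
--             while j + 1 < n and array[j + 1] != 0:
--                 j += 1
--             result.append((i, j))
--             i = j + 2
--         else:
--             i += 1
--     return result
-- ===== Notes on version B (the rewrite author's own statement) =====
-- stated objective: alternative
-- what changed: Replaces A's per-element start/end state machine with a run-based scan that finds each maximal non-zero run and emits (first index, last index) of the run directly.
-- intended difference: On arrays containing a non-zero run of length exactly 1, A reports that run as (start, -1) because its end variable is only updated from a run's second element onward, while B reports (start, start), the run's actual start and end index, which is the intended meaning of a segment. — e.g. on find_non_zero_segments([0, 5, 0, 1, 1]): A returns [(1, -1), (3, 4)], B returns [(1, 1), (3, 4)]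
import Mathlib
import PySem

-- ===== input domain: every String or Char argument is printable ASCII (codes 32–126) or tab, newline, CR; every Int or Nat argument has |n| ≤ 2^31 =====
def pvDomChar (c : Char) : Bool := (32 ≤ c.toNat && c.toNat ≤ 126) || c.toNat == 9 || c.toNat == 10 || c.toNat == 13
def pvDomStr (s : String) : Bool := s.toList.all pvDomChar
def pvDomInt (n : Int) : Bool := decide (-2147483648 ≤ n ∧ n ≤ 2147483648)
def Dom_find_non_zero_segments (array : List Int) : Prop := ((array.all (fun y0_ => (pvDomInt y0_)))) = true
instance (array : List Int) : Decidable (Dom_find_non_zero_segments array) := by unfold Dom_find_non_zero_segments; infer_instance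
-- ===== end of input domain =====

-- B replaces A's per-element start/end state machine with a run-based scan that
-- emits (first index, last index) of each maximal non-zero run; on runs of length 1
-- A returns end = -1 (its end variable is never set there) while B returns the run's
-- actual last index — stated below as the intended difference D_ (return value only).

-- ===== PORT A =====
-- one iteration of A's for-loop body (state = (start, end, result), i the index)
def pvStepA (array : List Int) (st : Int × Int × List (Int × Int)) (i : Nat) :
    Int × Int × List (Int × Int) :=
  if array.getD i 0 ≠ 0 then
    if st.1 = -1 then ((i : Int), st.2.1, st.2.2) else (st.1, (i : Int), st.2.2)
  else if st.1 ≥ 0 then (-1, -1, st.2.2 ++ [(st.1, st.2.1)])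
  else st

def find_non_zero_segments (array : List Int) : List (Int × Int) :=
  let st := (List.range array.length).foldl (pvStepA array) (-1, -1, [])
  if st.1 ≥ 0 then st.2.2 ++ [(st.1, st.2.1)] else st.2.2

-- ===== PORT B =====
-- inner while loop of B: number of further non-zero elements continuing a run
def pvCountRun : List Int → Nat
  | [] => 0
  | x :: xs => if x = 0 then 0 else pvCountRun xs + 1

-- outer while loop of B, recursing on the part of the array not yet scanned;
-- on a non-zero element at index i the run extends to index i + pvCountRun of the rest
def pvGoB : List Int → Int → List (Int × Int)
  | [], _ => []
  | x :: xs, i =>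
    if x = 0 then pvGoB xs (i + 1)
    else
      let k := pvCountRun xs
      (i, i + (k : Int)) :: pvGoB (xs.drop (k + 1)) (i + (k : Int) + 2)
termination_by l _ => l.length
decreasing_by
  all_goals simp [List.length_drop]

def find_non_zero_segments_alt (array : List Int) : List (Int × Int) :=
  pvGoB array 0

-- ===== PRECONDITION & SPEC =====
-- On arrays containing a non-zero run of length exactly 1, A reports that run as
-- (start, -1) (its end variable is only updated from a run's second element onward),
-- while B reports (start, start), the run's actual extent — the intended value.
def D_find_non_zero_segments (array : List Int) : Prop :=
  ∃ i < array.length, array.getD i 0 ≠ 0 ∧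
    (i = 0 ∨ array.getD (i - 1) 0 = 0) ∧
    (i = array.length - 1 ∨ array.getD (i + 1) 0 = 0)
instance (array : List Int) : Decidable (D_find_non_zero_segments array) := by
  unfold D_find_non_zero_segments; infer_instance

def Spec_find_non_zero_segments (array : List Int) (out : List (Int × Int)) : Prop :=
  ¬ D_find_non_zero_segments array → out = find_non_zero_segments_alt array
instance (array : List Int) (out : List (Int × Int)) : Decidable (Spec_find_non_zero_segments array out) := by unfold Spec_find_non_zero_segments; infer_instance

def pvDiffWitness_find_non_zero_segments : List Int := [0, 5, 0, 1, 1]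
def pvDiffWitnessOut_find_non_zero_segments : (List (Int × Int)) × (List (Int × Int)) :=
  ([(1, -1), (3, 4)], [(1, 1), (3, 4)])

-- ===== CLAIM (what is proved, stated in full; the proofs are below) =====
def Claim_unchanged_find_non_zero_segments : Prop := ∀ (array : List Int), Dom_find_non_zero_segments array → Spec_find_non_zero_segments array (find_non_zero_segments array)
def Claim_changed_find_non_zero_segments : Prop := Dom_find_non_zero_segments (pvDiffWitness_find_non_zero_segments) ∧ D_find_non_zero_segments (pvDiffWitness_find_non_zero_segments) ∧ find_non_zero_segments (pvDiffWitness_find_non_zero_segments) = pvDiffWitnessOut_find_non_zero_segments.1 ∧ find_non_zero_segments_alt (pvDiffWitness_find_non_zero_segments) = pvDiffWitnessOut_find_non_zero_segments.2 ∧ pvDiffWitnessOut_find_non_zero_segments.1 ≠ pvDiffWitnessOut_find_non_zero_segments.2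
def Claim_exact_find_non_zero_segments : Prop := ∀ (array : List Int), Dom_find_non_zero_segments array → D_find_non_zero_segments array → find_non_zero_segments array ≠ find_non_zero_segments_alt array

-- ===== LEMMAS AND PROOFS =====

-- A's recursion rendered over the suffix (carrying the -1 end for length-1 runs)
def pvGoA : List Int → Int → List (Int × Int)
  | [], _ => []
  | x :: xs, i =>
    if x = 0 then pvGoA xs (i + 1)
    else
      let k := pvCountRun xs
      (i, if k > 0 then i + (k : Int) else -1) :: pvGoA (xs.drop (k + 1)) (i + (k : Int) + 2)
termination_by l _ => l.length
decreasing_by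
  all_goals simp [List.length_drop]

-- value-level version of pvStepA (the element instead of the index)
def pvStepV (x : Int) (i : Nat) (st : Int × Int × List (Int × Int)) :
    Int × Int × List (Int × Int) :=
  if x ≠ 0 then
    if st.1 = -1 then ((i : Int), st.2.1, st.2.2) else (st.1, (i : Int), st.2.2)
  else if st.1 ≥ 0 then (-1, -1, st.2.2 ++ [(st.1, st.2.1)])
  else st

-- A's loop as structural recursion over the suffix being scanned
def pvFinA : List Int → Nat → (Int × Int × List (Int × Int)) → Int × Int × List (Int × Int)
  | [], _, st => st
  | x :: xs, i, st => pvFinA xs (i + 1) (pvStepV x i st)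

def pvFinish (st : Int × Int × List (Int × Int)) : List (Int × Int) :=
  if st.1 ≥ 0 then st.2.2 ++ [(st.1, st.2.1)] else st.2.2

lemma pvGetD_drop (arr : List Int) (x : Int) (xs : List Int) (i : Nat)
    (h : arr.drop i = x :: xs) : arr.getD i 0 = x := by
  have h0 : arr[i]? = some x := by
    have h1 : (arr.drop i)[0]? = arr[i + 0]? := List.getElem?_drop
    rw [h] at h1
    simpa using h1.symm
  simp [List.getD, h0]

lemma pvDrop_succ (arr : List Int) (x : Int) (xs : List Int) (i : Nat)
    (h : arr.drop i = x :: xs) : arr.drop (i + 1) = xs := by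
  have h2 : (arr.drop i).drop 1 = arr.drop (i + 1) := List.drop_drop
  rw [h] at h2
  simpa using h2.symm

lemma pvFoldl_eq_finA (arr : List Int) :
    ∀ (l : List Int) (i : Nat) (st : Int × Int × List (Int × Int)),
      arr.drop i = l →
      (List.range' i l.length).foldl (pvStepA arr) st = pvFinA l i st := by
  intro l
  induction l with
  | nil => intro i st h; simp [pvFinA]
  | cons x xs ih =>
    intro i st h
    have hx : arr.getD i 0 = x := pvGetD_drop arr x xs i h
    have hd : arr.drop (i + 1) = xs := pvDrop_succ arr x xs i h
    have hx' : arr[i]?.getD 0 = x := by simpa [List.getD] using hx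
    have hstep : pvStepA arr st i = pvStepV x i st := by
      simp [pvStepA, pvStepV, List.getD, hx']
    simp only [List.length_cons, List.range'_succ, List.foldl_cons, hstep, pvFinA]
    exact ih (i + 1) _ hd

-- main invariants, by strong induction on the length of the unscanned suffix:
-- M1: from a clean state A's remaining loop produces exactly pvGoA's segments;
-- M2: mid-run (start s ≥ 0, current end e) it emits (s, ·) and continues clean.
lemma pvMain (n : Nat) :
    ∀ l : List Int, l.length ≤ n →
      ((∀ (i : Nat) (r : List (Int × Int)),
          pvFinish (pvFinA l i (-1, -1, r)) = r ++ pvGoA l (i : Int)) ∧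
       (∀ (i : Nat) (s e : Int) (r : List (Int × Int)), 0 ≤ s →
          pvFinish (pvFinA l i (s, e, r)) =
            r ++ (s, if pvCountRun l = 0 then e else (i : Int) + pvCountRun l - 1) ::
              pvGoA (l.drop (pvCountRun l + 1)) ((i : Int) + pvCountRun l + 1))) := by
  induction n with
  | zero =>
    intro l hl
    have : l = [] := List.eq_nil_of_length_eq_zero (Nat.le_zero.mp hl)
    subst this
    constructor
    · intro i r; simp [pvFinA, pvFinish, pvGoA]
    · intro i s e r hs
      simp [pvFinA, pvFinish, pvGoA, pvCountRun, hs]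
  | succ n ih =>
    intro l hl
    match l with
    | [] =>
      constructor
      · intro i r; simp [pvFinA, pvFinish, pvGoA]
      · intro i s e r hs
        simp [pvFinA, pvFinish, pvGoA, pvCountRun, hs]
    | x :: xs =>
      have hxs : xs.length ≤ n := by simp at hl; omega
      constructor
      · intro i r
        by_cases hx : x = 0
        · subst hx
          simp only [pvFinA, pvStepV]
          norm_num
          rw [(ih xs hxs).1 (i + 1) r]
          simp [pvGoA]
        · simp only [pvFinA, pvStepV]
          simp only [hx, if_pos, ne_eq, not_false_iff, if_true]
          norm_num
          rw [(ih xs hxs).2 (i + 1) (i : Int) (-1) r (by positivity)]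
          simp only [pvGoA, hx, ite_false, if_neg]
          congr 1
          by_cases hk : pvCountRun xs = 0
          · simp only [hk, ite_true, if_pos, Nat.lt_irrefl, gt_iff_lt, Nat.cast_zero,
              List.cons.injEq, Prod.mk.injEq]
            refine ⟨⟨trivial, by simp⟩, ?_⟩
            push_cast
            ring_nf
          · have hk1 : 0 < pvCountRun xs := Nat.pos_of_ne_zero hk
            simp only [hk, hk1, ite_true, ite_false, gt_iff_lt, if_pos,
              List.cons.injEq, Prod.mk.injEq]
            refine ⟨⟨trivial, by push_cast; ring⟩, ?_⟩
            push_cast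
            ring_nf
      · intro i s e r hs
        by_cases hx : x = 0
        · subst hx
          have hcr : pvCountRun ((0:Int) :: xs) = 0 := by simp [pvCountRun]
          simp only [pvFinA, pvStepV]
          norm_num
          rw [if_pos hs]
          rw [(ih xs hxs).1 (i + 1) (r ++ [(s, e)])]
          simp [hcr]
        · have hcr : pvCountRun (x :: xs) = pvCountRun xs + 1 := by simp [pvCountRun, hx]
          have hsne : s ≠ -1 := by omega
          simp only [pvFinA, pvStepV]
          simp only [hx, ne_eq, not_false_iff, if_true, hsne, if_neg, ite_false]
          rw [(ih xs hxs).2 (i + 1) s (i : Int) r hs, hcr]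
          congr 1
          simp only [Nat.succ_ne_zero, ite_false, List.drop_succ_cons,
            List.cons.injEq, Prod.mk.injEq]
          refine ⟨⟨trivial, ?_⟩, ?_⟩
          · by_cases hk : pvCountRun xs = 0
            · simp only [hk, ite_true, if_pos]
              push_cast; ring
            · simp only [hk, ite_false, if_neg, not_false_iff]
              push_cast; ring
          · push_cast
            ring_nf

-- no maximal non-zero run of length exactly 1, phrased along pvGoB's recursion
def pvNS : List Int → Bool
  | [] => true
  | x :: xs =>
    if x = 0 then pvNS xs
    else decide (1 ≤ pvCountRun xs) && pvNS (xs.drop (pvCountRun xs + 1))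
termination_by l => l.length
decreasing_by
  all_goals simp [List.length_drop]

lemma pvCountRun_le (xs : List Int) : pvCountRun xs ≤ xs.length := by
  induction xs with
  | nil => simp [pvCountRun]
  | cons x xs ih => by_cases h : x = 0 <;> simp [pvCountRun, h] <;> omega

lemma pvCountRun_zero_at (xs : List Int) (h : pvCountRun xs < xs.length) :
    xs.getD (pvCountRun xs) 0 = 0 := by
  induction xs with
  | nil => simp at h
  | cons x xs ih =>
    by_cases hx : x = 0
    · simp [pvCountRun, hx]
    · simp only [pvCountRun, hx, if_neg, ite_false] at h ⊢
      simp only [List.length_cons] at h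
      exact ih (by omega)

lemma pvCountRun_pre (xs : List Int) : ∀ j < pvCountRun xs, xs.getD j 0 ≠ 0 := by
  induction xs with
  | nil => simp [pvCountRun]
  | cons x xs ih =>
    intro j hj
    by_cases hx : x = 0
    · simp [pvCountRun, hx] at hj
    · simp only [pvCountRun, hx, ite_false, if_neg] at hj
      match j with
      | 0 => simpa using hx
      | j + 1 =>
        simp only [List.getD_cons_succ]
        exact ih j (by omega)

-- getD through drop
lemma pvGetD_drop_idx (arr l : List Int) (m j : Nat)
    (h : arr.drop m = l) (hj : j < l.length) : arr.getD (m + j) 0 = l.getD j 0 := by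
  have h1 : l[j]? = arr[m + j]? := by
    rw [← h]; exact List.getElem?_drop
  simp [List.getD, h1]

lemma pvDrop_len (arr l : List Int) (m : Nat) (h : arr.drop m = l) :
    l.length = arr.length - m := by
  rw [← h, List.length_drop]

-- B = pvGoA wherever pvNS holds
lemma pvNS_goA_eq_goB (n : Nat) : ∀ l : List Int, l.length ≤ n →
    pvNS l = true → ∀ i : Int, pvGoA l i = pvGoB l i := by
  induction n with
  | zero =>
    intro l hl _ i
    have : l = [] := List.eq_nil_of_length_eq_zero (Nat.le_zero.mp hl)
    subst this; simp [pvGoA, pvGoB]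
  | succ n ih =>
    intro l hl hns i
    match l with
    | [] => simp [pvGoA, pvGoB]
    | x :: xs =>
      have hxs : xs.length ≤ n := by simp at hl; omega
      by_cases hx : x = 0
      · subst hx
        simp only [pvNS] at hns
        simp only [pvGoA, pvGoB, if_pos]
        norm_num
        exact ih xs hxs (by simpa using hns) (i + 1)
      · simp only [pvNS, hx, ite_false, if_neg, Bool.and_eq_true, decide_eq_true_eq] at hns
        obtain ⟨hk, hrest⟩ := hns
        simp only [pvGoA, pvGoB, hx, ite_false, if_neg]
        have hdl : (xs.drop (pvCountRun xs + 1)).length ≤ n := by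
          have := List.length_drop (l := xs) (i := pvCountRun xs + 1)
          omega
        rw [ih _ hdl hrest, if_pos (show pvCountRun xs > 0 by omega)]

-- pvNS failing yields a length-1 run, i.e. a D_ witness
lemma pvNS_false_D (arr : List Int) (n : Nat) : ∀ l m, l.length ≤ n →
    arr.drop m = l → (m = 0 ∨ arr.getD (m - 1) 0 = 0) →
    pvNS l = false → D_find_non_zero_segments arr := by
  induction n with
  | zero =>
    intro l m hl _ _ hns
    have : l = [] := List.eq_nil_of_length_eq_zero (Nat.le_zero.mp hl)
    subst this; simp [pvNS] at hns
  | succ n ih =>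
    intro l m hl hdrop hleft hns
    match l with
    | [] => simp [pvNS] at hns
    | x :: xs =>
      have hxs : xs.length ≤ n := by simp at hl; omega
      have hlen : arr.length = m + xs.length + 1 := by
        have := pvDrop_len arr (x :: xs) m hdrop
        have hm : m ≤ arr.length := by
          by_contra hcon
          have : arr.drop m = [] := List.drop_eq_nil_of_le (by omega)
          rw [hdrop] at this; simp at this
        simp at this; omega
      have hgx : arr.getD m 0 = x := pvGetD_drop arr x xs m hdrop
      have hdx : arr.drop (m + 1) = xs := pvDrop_succ arr x xs m hdrop
      by_cases hx : x = 0
      · subst hx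
        simp only [pvNS] at hns
        exact ih xs (m + 1) hxs hdx (Or.inr (by simpa using hgx)) (by simpa using hns)
      · simp only [pvNS, hx, ite_false, if_neg, Bool.and_eq_false_iff] at hns
        rcases hns with hk | hrest
        · -- length-1 run at index m
          have hk0 : pvCountRun xs = 0 := by
            simp only [decide_eq_false_iff_not, not_le] at hk; omega
          refine ⟨m, by omega, by rw [hgx]; exact hx, hleft, ?_⟩
          cases xs with
          | nil =>
            left
            simp at hlen
            omega
          | cons y ys =>
            right
            have hy : y = 0 := by
              by_contra hy
              simp [pvCountRun, hy] at hk0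
            have := pvGetD_drop arr y ys (m + 1) hdx
            rw [this, hy]
        · -- recurse past the run and its terminating zero
          have hkx : pvCountRun xs < xs.length := by
            by_contra hcon
            have : xs.drop (pvCountRun xs + 1) = [] :=
              List.drop_eq_nil_of_le (by omega)
            rw [this] at hrest; simp [pvNS] at hrest
          have hdrop2 : arr.drop (m + 1 + (pvCountRun xs + 1)) = xs.drop (pvCountRun xs + 1) := by
            rw [← hdx, List.drop_drop]
          have hz : arr.getD (m + 1 + pvCountRun xs) 0 = 0 := by
            rw [pvGetD_drop_idx arr xs (m + 1) (pvCountRun xs) hdx hkx]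
            exact pvCountRun_zero_at xs hkx
          refine ih (xs.drop (pvCountRun xs + 1)) (m + 1 + (pvCountRun xs + 1))
            (by have := List.length_drop (l := xs) (i := pvCountRun xs + 1); omega)
            hdrop2 (Or.inr (by simpa using hz)) hrest

-- a D_ witness forces pvNS to fail
lemma pvD_NS_false (arr : List Int) (n : Nat) : ∀ l m w, l.length ≤ n →
    arr.drop m = l → m ≤ w → w < arr.length →
    arr.getD w 0 ≠ 0 →
    (w = 0 ∨ arr.getD (w - 1) 0 = 0) →
    (w = arr.length - 1 ∨ arr.getD (w + 1) 0 = 0) →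
    pvNS l = false := by
  induction n with
  | zero =>
    intro l m w hl hdrop hmw hw _ _ _
    have : l = [] := List.eq_nil_of_length_eq_zero (Nat.le_zero.mp hl)
    subst this
    have : arr.length ≤ m := by
      by_contra hcon
      have h1 : (arr.drop m).length = arr.length - m := List.length_drop
      rw [hdrop] at h1; simp at h1; omega
    omega
  | succ n ih =>
    intro l m w hl hdrop hmw hw hwz hwl hwr
    match l with
    | [] =>
      have : arr.length ≤ m := by
        by_contra hcon
        have h1 : (arr.drop m).length = arr.length - m := List.length_drop
        rw [hdrop] at h1; simp at h1; omega
      omega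
    | x :: xs =>
      have hxs : xs.length ≤ n := by simp at hl; omega
      have hlen : arr.length = m + xs.length + 1 := by
        have h1 : (arr.drop m).length = arr.length - m := List.length_drop
        rw [hdrop] at h1
        have hm : m ≤ arr.length := by
          by_contra hcon
          have : arr.drop m = [] := List.drop_eq_nil_of_le (by omega)
          rw [hdrop] at this; simp at this
        simp at h1; omega
      have hgx : arr.getD m 0 = x := pvGetD_drop arr x xs m hdrop
      have hdx : arr.drop (m + 1) = xs := pvDrop_succ arr x xs m hdrop
      by_cases hx : x = 0
      · subst hx
        have hwm : w ≠ m := by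
          intro hh; rw [hh, hgx] at hwz; exact hwz rfl
        simp only [pvNS]
        exact ih xs (m + 1) w hxs hdx (by omega) hw hwz hwl hwr
      · set k := pvCountRun xs with hk
        by_cases hk0 : k = 0
        · simp [pvNS, hx, ← hk, hk0]
        · have hk1 : 1 ≤ k := by omega
          -- elements at indices m .. m+k are non-zero, index m+k+1 (if any) is zero
          have hpre : ∀ j, 1 ≤ j → j ≤ k → arr.getD (m + j) 0 ≠ 0 := by
            intro j hj1 hj2
            have hjlt : j - 1 < xs.length := by
              have := pvCountRun_le xs; omega
            have := pvGetD_drop_idx arr xs (m + 1) (j - 1) hdx hjlt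
            have heq : m + 1 + (j - 1) = m + j := by omega
            rw [heq] at this
            rw [this]
            exact pvCountRun_pre xs (j - 1) (by omega)
          -- the witness cannot lie in m..m+k+1
          have hwm : w ≠ m := by
            intro hh
            subst hh
            rcases hwr with h1 | h1
            · -- w = arr.length - 1 → xs = [] → k = 0, contradiction
              have : xs.length = 0 := by omega
              have : xs = [] := List.eq_nil_of_length_eq_zero this
              rw [this] at hk; simp [pvCountRun] at hk; omega
            · exact hpre 1 le_rfl hk1 h1
          have hwrun : ∀ j, 1 ≤ j → j ≤ k → w ≠ m + j := by
            intro j hj1 hj2 hh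
            subst hh
            rcases hwl with h1 | h1
            · omega
            · by_cases hj : j = 1
              · subst hj
                have heq1 : m + 1 - 1 = m := by omega
                rw [heq1] at h1
                rw [h1] at hgx
                exact hx hgx.symm
              · have := hpre (j - 1) (by omega) (by omega)
                have heq : m + j - 1 = m + (j - 1) := by omega
                rw [heq] at h1
                exact this h1
          have hwz1 : w ≠ m + k + 1 := by
            intro hh
            have hkxlen : k < xs.length := by
              by_contra hcon
              have : k = xs.length := by have := pvCountRun_le xs; omega
              omega
            have := pvGetD_drop_idx arr xs (m + 1) k hdx hkxlen
            have heq : m + 1 + k = m + k + 1 := by ring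
            rw [heq] at this
            rw [hh, this] at hwz
            exact hwz (pvCountRun_zero_at xs hkxlen)
          have hwge : m + k + 2 ≤ w := by
            rcases Nat.lt_or_ge w (m + k + 2) with hlt | hge
            · exfalso
              rcases Nat.lt_or_ge w (m + 1) with h2 | h2
              · exact hwm (by omega)
              · rcases Nat.lt_or_ge w (m + k + 1) with h3 | h3
                · exact hwrun (w - m) (by omega) (by omega) (by omega)
                · exact hwz1 (by omega)
            · exact hge
          have hdrop2 : arr.drop (m + 1 + (k + 1)) = xs.drop (k + 1) := by
            rw [← hdx, List.drop_drop]
          have hres := ih (xs.drop (k + 1)) (m + 1 + (k + 1)) w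
            (by have := List.length_drop (l := xs) (i := k + 1); omega)
            hdrop2 (by omega) hw hwz hwl hwr
          simp [pvNS, hx, ← hk, hres]

-- pvNS failing makes pvGoA and pvGoB differ (the first length-1 run gives -1 vs its index)
lemma pvNS_false_ne (n : Nat) : ∀ l : List Int, l.length ≤ n →
    pvNS l = false → ∀ i : Int, 0 ≤ i → pvGoA l i ≠ pvGoB l i := by
  induction n with
  | zero =>
    intro l hl hns _ _
    have : l = [] := List.eq_nil_of_length_eq_zero (Nat.le_zero.mp hl)
    subst this; simp [pvNS] at hns
  | succ n ih =>
    intro l hl hns i hi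
    match l with
    | [] => simp [pvNS] at hns
    | x :: xs =>
      have hxs : xs.length ≤ n := by simp at hl; omega
      by_cases hx : x = 0
      · subst hx
        simp only [pvNS] at hns
        simp only [pvGoA, pvGoB, if_pos]
        norm_num
        exact ih xs hxs (by simpa using hns) (i + 1) (by omega)
      · simp only [pvNS, hx, ite_false, if_neg, Bool.and_eq_false_iff] at hns
        simp only [pvGoA, pvGoB, hx, ite_false, if_neg]
        rcases hns with hk | hrest
        · have hk0 : pvCountRun xs = 0 := by
            simp only [decide_eq_false_iff_not, not_le] at hk; omega
          intro hcon
          simp only [hk0, gt_iff_lt, Nat.lt_irrefl, ite_false, if_neg,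
            List.cons.injEq, Prod.mk.injEq, Nat.cast_zero] at hcon
          omega
        · intro hcon
          simp only [gt_iff_lt, List.cons.injEq, Prod.mk.injEq] at hcon
          have hdl : (xs.drop (pvCountRun xs + 1)).length ≤ n := by
            have := List.length_drop (l := xs) (i := pvCountRun xs + 1)
            omega
          exact ih _ hdl hrest (i + (pvCountRun xs : Int) + 2)
            (by positivity) hcon.2

lemma pvA_eq_goA (array : List Int) : find_non_zero_segments array = pvGoA array 0 := by
  show pvFinish ((List.range array.length).foldl (pvStepA array) (-1, -1, [])) = pvGoA array 0
  rw [List.range_eq_range', pvFoldl_eq_finA array array 0 (-1, -1, []) (by simp),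
    (pvMain array.length array (le_refl _)).1 0 []]
  simp

-- ===== VERDICT (by name: the statements are the Claim_ definitions above) =====
theorem find_non_zero_segments_spec : Claim_unchanged_find_non_zero_segments := by
  intro array _ hnD
  show find_non_zero_segments array = find_non_zero_segments_alt array
  have hns : pvNS array = true := by
    by_contra hcon
    exact hnD (pvNS_false_D array array.length array 0 (le_refl _) (by simp)
      (Or.inl rfl) (by simpa using hcon))
  rw [pvA_eq_goA]
  exact pvNS_goA_eq_goB array.length array (le_refl _) hns 0

theorem find_non_zero_segments_changed : Claim_changed_find_non_zero_segments := by
  unfold Claim_changed_find_non_zero_segments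
  refine ⟨by decide, by decide, by decide, ?_, by decide⟩
  show find_non_zero_segments_alt pvDiffWitness_find_non_zero_segments
    = pvDiffWitnessOut_find_non_zero_segments.2
  norm_num [pvDiffWitness_find_non_zero_segments, pvDiffWitnessOut_find_non_zero_segments,
    find_non_zero_segments_alt, pvGoB, pvCountRun]

theorem find_non_zero_segments_tight : Claim_exact_find_non_zero_segments := by
  intro array _ hD
  obtain ⟨w, hw, hwz, hwl, hwr⟩ := hD
  have hns : pvNS array = false :=
    pvD_NS_false array array.length array 0 w (le_refl _) (by simp)
      (Nat.zero_le _) hw hwz hwl hwr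
  rw [pvA_eq_goA]
  exact pvNS_false_ne array.length array (le_refl _) hns 0 (le_refl _)
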